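-- pv_equiv track=rewrite | github.com/matejnesuta/IVS_team_project | calculator/mathlib/calc_exp.py | neg_first_oprnd
-- ===== SOURCE A (Python) =====
-- def neg_first_oprnd(exp, oprtr_set):
--     cut_sign = exp[1:]
--     ops = {}
--     for op in oprtr_set:
--         if cut_sign.find(op) > -1:
--             ops[op] = cut_sign.find(op)
--     #case of sole negative number, eg. -2
--     if len(ops) == 0:
--         return f"({exp})"
--
--     next_op = min(ops.values()) + 1
--     if next_op == 1:
--         return f"(-1)*{cut_sign}"
--     neg_start = exp[:next_op]
--     cut_exp = exp[next_op:]
--     return f"({neg_start}){cut_exp}"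
-- ===== SOURCE B (Python) =====
-- def neg_first_oprnd(exp, oprtr_set):
--     cut_sign = exp[1:]
--     idx = -1
--     for i in range(len(cut_sign) + 1):
--         if any(cut_sign.startswith(op, i) for op in oprtr_set):
--             idx = i
--             break
--     if idx == -1:
--         return f"({exp})"
--     next_op = idx + 1
--     if next_op == 1:
--         return f"(-1)*{cut_sign}"
--     return f"({exp[:next_op]}){exp[next_op:]}"
-- ===== Notes on version B (the rewrite author's own statement) =====
-- stated objective: faster
-- what changed: A builds a dict mapping each operator to its find() position (scanning cut_sign once per operator, calling find twice) and takes the minimum of the values; B does a single left-to-right scan over the positions of cut_sign = exp[1:] and stops at the first position where some operator starts, eliminating the dict, the min, and the full-string scans.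
import Mathlib
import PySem

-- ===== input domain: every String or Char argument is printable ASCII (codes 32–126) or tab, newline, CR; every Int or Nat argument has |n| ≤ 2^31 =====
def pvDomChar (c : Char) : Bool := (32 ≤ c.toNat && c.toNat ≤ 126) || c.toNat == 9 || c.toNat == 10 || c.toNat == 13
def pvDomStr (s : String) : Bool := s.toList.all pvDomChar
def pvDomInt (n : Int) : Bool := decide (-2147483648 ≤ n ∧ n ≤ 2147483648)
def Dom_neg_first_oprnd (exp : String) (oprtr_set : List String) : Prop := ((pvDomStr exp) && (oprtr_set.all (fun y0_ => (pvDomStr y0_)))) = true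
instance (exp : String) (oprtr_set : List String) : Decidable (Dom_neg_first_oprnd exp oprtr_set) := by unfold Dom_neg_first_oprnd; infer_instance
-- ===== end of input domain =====

-- B replaces A's per-operator find/dict/min construction by a single left-to-right scan of the
-- positions of exp[1:], taking the first position at which some operator starts (objective: faster — it stops at the first operator position).

-- ===== PORT A =====
def neg_first_oprnd (exp : String) (oprtr_set : List String) : String :=
  let cut_sign : List Char := PySem.Chars.slice exp.toList (some 1) none
  let ops : PySem.Dict (List Char) Int :=
    oprtr_set.foldl (fun d op =>
      if PySem.Chars.find cut_sign op.toList > -1 then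
        d.insert op.toList (PySem.Chars.find cut_sign op.toList)
      else d) PySem.Dict.empty
  if ops.size == 0 then
    String.ofList (['('] ++ exp.toList ++ [')'])
  else
    -- min(ops.values()): values is nonempty in this branch, so .getD 0 is never used
    let next_op : Int := (PySem.List.min? ops.values id).getD 0 + 1
    if next_op == 1 then
      String.ofList ("(-1)*".toList ++ cut_sign)
    else
      String.ofList (['('] ++ PySem.Chars.slice exp.toList none (some next_op) ++ [')']
                 ++ PySem.Chars.slice exp.toList (some next_op) none)

-- ===== PORT B =====
-- the 'for i in range(...): if any(...): idx = i; break' loop of Source B;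
-- cut_sign.startswith(op, i) is ported as startswith on cut_sign.drop i, exact since 0 ≤ i ≤ len(cut_sign)
def pvScan (cut : List Char) (oprtr_set : List String) : List Int → Int
  | [] => -1
  | i :: rest =>
    if oprtr_set.any (fun op => PySem.Chars.startswith (cut.drop i.toNat) op.toList) then i
    else pvScan cut oprtr_set rest

def neg_first_oprnd_alt (exp : String) (oprtr_set : List String) : String :=
  let cut_sign : List Char := PySem.Chars.slice exp.toList (some 1) none
  let idx : Int := pvScan cut_sign oprtr_set (PySem.List.pyRange 0 ((cut_sign.length : Int) + 1))
  if idx == -1 then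
    String.ofList (['('] ++ exp.toList ++ [')'])
  else
    let next_op : Int := idx + 1
    if next_op == 1 then
      String.ofList ("(-1)*".toList ++ cut_sign)
    else
      String.ofList (['('] ++ PySem.Chars.slice exp.toList none (some next_op) ++ [')']
                 ++ PySem.Chars.slice exp.toList (some next_op) none)

-- ===== PRECONDITION & SPEC =====
def Spec_neg_first_oprnd (exp : String) (oprtr_set : List String) (out : String) : Prop := out = neg_first_oprnd_alt exp oprtr_set
instance (exp : String) (oprtr_set : List String) (out : String) : Decidable (Spec_neg_first_oprnd exp oprtr_set out) := by unfold Spec_neg_first_oprnd; infer_instance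

-- ===== CLAIM (what is proved, stated in full; the proofs are below) =====
def Claim_equal_neg_first_oprnd : Prop := ∀ (exp : String) (oprtr_set : List String), Dom_neg_first_oprnd exp oprtr_set → Spec_neg_first_oprnd exp oprtr_set (neg_first_oprnd exp oprtr_set)

-- ===== LEMMAS AND PROOFS =====

-- getD after a fold of inserts whose value depends only on the key
theorem pv_getD_foldl_insert (l : List (List Char)) (g : List Char → Int)
    (d : PySem.Dict (List Char) Int) (k : List Char) :
    (l.foldl (fun d k' => d.insert k' (g k')) d).getD k 0
      = if k ∈ l then g k else d.getD k 0 := by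
  induction l generalizing d with
  | nil => simp
  | cons a t ih =>
      simp only [List.foldl_cons, ih, PySem.Dict.getD_insert, List.mem_cons]
      by_cases h1 : k ∈ t <;> by_cases h2 : k = a <;> simp [h1, h2]

-- membership in the values of that fold (from the empty dict)
theorem pv_mem_values_foldl (l : List (List Char)) (g : List Char → Int) (v : Int) :
    v ∈ (l.foldl (fun d k' => d.insert k' (g k')) PySem.Dict.empty).values
      ↔ ∃ k ∈ l, g k = v := by
  have hnd : (l.foldl (fun d k' => d.insert k' (g k')) (PySem.Dict.empty : PySem.Dict (List Char) Int)).keys.Nodup :=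
    PySem.Dict.nodup_keys_foldl_insert l (fun _ k' => g k') PySem.Dict.empty (by simp [PySem.Dict.empty, PySem.Dict.keys])
  have hkeys := PySem.Dict.keys_foldl_insert l (fun _ k' => g k') (PySem.Dict.empty : PySem.Dict (List Char) Int)
  have hvals : (l.foldl (fun d k' => d.insert k' (g k')) (PySem.Dict.empty : PySem.Dict (List Char) Int)).values
      = (l.foldl (fun d k' => d.insert k' (g k')) (PySem.Dict.empty : PySem.Dict (List Char) Int)).keys.map
          (fun k => (l.foldl (fun d k' => d.insert k' (g k')) (PySem.Dict.empty : PySem.Dict (List Char) Int)).getD k 0) := by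
    show (l.foldl (fun d k' => d.insert k' (g k')) (PySem.Dict.empty : PySem.Dict (List Char) Int)).items.map (·.2) = _
    rw [PySem.Dict.items_eq_map_keys _ hnd (0 : Int), List.map_map]
    rfl
  rw [hvals, hkeys]
  constructor
  · rintro h
    rw [List.mem_map] at h
    obtain ⟨k, hk, hv⟩ := h
    have hkl : k ∈ l := by
      rcases (PySem.Set.mem_update _ l k).1 hk with h' | h'
      · exact absurd h' (by simp [PySem.Dict.empty, PySem.Dict.keys])
      · exact h'
    exact ⟨k, hkl, by simpa [pv_getD_foldl_insert, hkl] using hv⟩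
  · rintro ⟨k, hk, hv⟩
    rw [List.mem_map]
    exact ⟨k, (PySem.Set.mem_update _ l k).2 (Or.inr hk), by simpa [pv_getD_foldl_insert, hk] using hv⟩

-- min? over a list of ints equals a stated least member
theorem pv_min?_eq (l : List Int) (m : Int) (hm : m ∈ l) (hle : ∀ x ∈ l, m ≤ x) :
    PySem.List.min? l (id : Int → Int) = some m := by
  cases hmin : PySem.List.min? l (id : Int → Int) with
  | none =>
      exfalso
      rw [PySem.List.min?_eq_none_iff] at hmin
      subst hmin; simp at hm
  | some m' =>
      have h1 := PySem.List.min?_mem hmin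
      have h2 := PySem.List.min?_isMin hmin
      have : m' = m := le_antisymm (h2 m hm) (hle m' h1)
      rw [this]

-- the scan finds the first position satisfying the predicate
theorem pv_scan_found (cut : List Char) (oprtr_set : List String)
    (Q : Nat → Bool)
    (hQ : ∀ i : Nat, Q i = oprtr_set.any (fun op => PySem.Chars.startswith (cut.drop i) op.toList)) :
    ∀ (b a m : Nat), a ≤ m → m < a + b → Q m = true → (∀ k < m, Q k = false) →
      pvScan cut oprtr_set ((List.range' a b).map (Nat.cast : Nat → Int)) = (m : Int) := by
  intro b
  induction b with
  | zero => intro a m h1 h2; omega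
  | succ b ih =>
      intro a m h1 h2 hQm hmin
      rw [List.range'_succ]
      by_cases ha : a = m
      · subst ha
        simp [pvScan, ← hQ, hQm]
      · have haQ : Q a = false := hmin a (by omega)
        simp only [List.map_cons, pvScan, Int.toNat_natCast, ← hQ, haQ]
        simp only [Bool.false_eq_true, if_false]
        exact ih (a + 1) m (by omega) (by omega) hQm hmin

-- the scan returns -1 when no position in the range satisfies the predicate
theorem pv_scan_none (cut : List Char) (oprtr_set : List String)
    (Q : Nat → Bool)
    (hQ : ∀ i : Nat, Q i = oprtr_set.any (fun op => PySem.Chars.startswith (cut.drop i) op.toList)) :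
    ∀ (b a : Nat), (∀ k, a ≤ k → k < a + b → Q k = false) →
      pvScan cut oprtr_set ((List.range' a b).map (Nat.cast : Nat → Int)) = -1 := by
  intro b
  induction b with
  | zero => intro a _; simp [pvScan]
  | succ b ih =>
      intro a h
      rw [List.range'_succ]
      have haQ : Q a = false := h a (le_refl a) (by omega)
      simp only [List.map_cons, pvScan, Int.toNat_natCast, ← hQ, haQ]
      simp only [Bool.false_eq_true, if_false]
      exact ih (a + 1) (fun k hk1 hk2 => h k (by omega) (by omega))

-- ===== VERDICT (by name: the statement is the Claim_ definition above) =====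
theorem neg_first_oprnd_spec : Claim_equal_neg_first_oprnd := by
  intro exp oprtr_set _
  unfold Spec_neg_first_oprnd neg_first_oprnd neg_first_oprnd_alt
  simp only []
  set cut : List Char := PySem.Chars.slice exp.toList (some 1) none with hcutdef
  -- A's dict is a fold of inserts over the filtered mapped operator list
  have hA : (oprtr_set.foldl (fun d op =>
        if PySem.Chars.find cut op.toList > -1 then
          d.insert op.toList (PySem.Chars.find cut op.toList)
        else d) PySem.Dict.empty)
      = (((oprtr_set.map String.toList).filter
            (fun k => decide (PySem.Chars.find cut k > -1))).foldl
          (fun d k => d.insert k (PySem.Chars.find cut k)) PySem.Dict.empty) := by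
    rw [List.foldl_filter, List.foldl_map]
    simp only [decide_eq_true_eq]
  rw [hA]
  by_cases hEx : ∃ op ∈ oprtr_set, op.toList <:+: cut
  · -- some operator occurs in cut
    have hP : ∃ i : Nat, ∃ op ∈ oprtr_set, op.toList <+: List.drop i cut := by
      obtain ⟨op, hop, hinf⟩ := hEx
      obtain ⟨j, hj⟩ := (PySem.Chars.exists_prefix_drop_iff_isIn op.toList cut).2
        ((PySem.Chars.isIn_iff_infix op.toList cut).2 hinf)
      exact ⟨j, op, hop, hj⟩
    set m : Nat := Nat.find hP with hmdef
    obtain ⟨opm, hopm, hprem⟩ := Nat.find_spec hP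
    have hmin : ∀ k < m, ¬ ∃ op ∈ oprtr_set, op.toList <+: List.drop k cut :=
      fun k hk => Nat.find_min hP hk
    -- the least position is within the scanned range
    have hfind_eq : ∀ op : String, op ∈ oprtr_set → op.toList <+: List.drop m cut →
        PySem.Chars.find cut op.toList = (m : Int) := by
      intro op hop hpre
      have hinf : op.toList <:+: cut :=
        (List.IsPrefix.isInfix hpre).trans (List.IsSuffix.isInfix (List.drop_suffix m cut))
      have hnn : 0 ≤ PySem.Chars.find cut op.toList :=
        (PySem.Chars.find_nonneg_iff cut op.toList).2 hinf
      obtain ⟨hpre', hleast⟩ := PySem.Chars.find_spec hnn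
      have h1 : m ≤ (PySem.Chars.find cut op.toList).toNat :=
        Nat.find_min' hP ⟨op, hop, hpre'⟩
      have h2 : (PySem.Chars.find cut op.toList).toNat ≤ m := by
        by_contra hlt
        exact hleast m (by omega) hpre
      have : (PySem.Chars.find cut op.toList).toNat = m := le_antisymm h2 h1
      omega
    have hmle : m ≤ cut.length := by
      have := hfind_eq opm hopm hprem
      have h2 := PySem.Chars.find_le_length cut opm.toList
      omega
    -- B's scan returns m
    have hscan : pvScan cut oprtr_set (PySem.List.pyRange 0 ((cut.length : Int) + 1)) = (m : Int) := by
      have hr : ((cut.length : Int) + 1) = ((cut.length + 1 : Nat) : Int) := by push_cast; ring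
      rw [hr, PySem.List.pyRange_zero_natCast, List.range_eq_range']
      refine pv_scan_found cut oprtr_set
        (fun i => oprtr_set.any (fun op => PySem.Chars.startswith (List.drop i cut) op.toList))
        (fun i => rfl) (cut.length + 1) 0 m (Nat.zero_le m) (by omega) ?_ ?_
      · rw [List.any_eq_true]
        exact ⟨opm, hopm, (PySem.Chars.startswith_iff _ _).2 hprem⟩
      · intro k hk
        rw [Bool.eq_false_iff]
        intro hany
        rw [List.any_eq_true] at hany
        obtain ⟨op, hop, hsw⟩ := hany
        exact hmin k hk ⟨op, hop, (PySem.Chars.startswith_iff _ _).1 hsw⟩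
    -- A's min over the dict values is m
    have hmem : ((m : Int)) ∈ (((oprtr_set.map String.toList).filter
          (fun k => decide (PySem.Chars.find cut k > -1))).foldl
        (fun d k => d.insert k (PySem.Chars.find cut k)) PySem.Dict.empty).values := by
      rw [pv_mem_values_foldl]
      refine ⟨opm.toList, ?_, hfind_eq opm hopm hprem⟩
      rw [List.mem_filter]
      refine ⟨List.mem_map.2 ⟨opm, hopm, rfl⟩, ?_⟩
      rw [hfind_eq opm hopm hprem]
      simp only [decide_eq_true_eq, gt_iff_lt]
      omega
    have hall : ∀ v ∈ (((oprtr_set.map String.toList).filter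
          (fun k => decide (PySem.Chars.find cut k > -1))).foldl
        (fun d k => d.insert k (PySem.Chars.find cut k)) PySem.Dict.empty).values, (m : Int) ≤ v := by
      intro v hv
      rw [pv_mem_values_foldl] at hv
      obtain ⟨k, hk, hkv⟩ := hv
      rw [List.mem_filter] at hk
      obtain ⟨hkL, hkpos⟩ := hk
      obtain ⟨op, hop, hopk⟩ := List.mem_map.1 hkL
      have hnn : 0 ≤ PySem.Chars.find cut k := by
        simp only [decide_eq_true_eq] at hkpos; omega
      obtain ⟨hpre', _⟩ := PySem.Chars.find_spec hnn
      have : m ≤ (PySem.Chars.find cut k).toNat :=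
        Nat.find_min' hP ⟨op, hop, by rw [hopk]; exact hpre'⟩
      omega
    have hmin? : PySem.List.min? (((oprtr_set.map String.toList).filter
          (fun k => decide (PySem.Chars.find cut k > -1))).foldl
        (fun d k => d.insert k (PySem.Chars.find cut k)) PySem.Dict.empty).values (id : Int → Int)
        = some (m : Int) := pv_min?_eq _ _ hmem hall
    have hsz : ((((oprtr_set.map String.toList).filter
          (fun k => decide (PySem.Chars.find cut k > -1))).foldl
        (fun d k => d.insert k (PySem.Chars.find cut k)) PySem.Dict.empty).size == 0) = false := by
      rw [beq_eq_false_iff_ne]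
      intro h0
      have hit : (((oprtr_set.map String.toList).filter
            (fun k => decide (PySem.Chars.find cut k > -1))).foldl
          (fun d k => d.insert k (PySem.Chars.find cut k)) PySem.Dict.empty).items = [] :=
        List.length_eq_zero_iff.1 h0
      have hv : (((oprtr_set.map String.toList).filter
            (fun k => decide (PySem.Chars.find cut k > -1))).foldl
          (fun d k => d.insert k (PySem.Chars.find cut k)) PySem.Dict.empty).values = [] := by
        show (((oprtr_set.map String.toList).filter
            (fun k => decide (PySem.Chars.find cut k > -1))).foldl
          (fun d k => d.insert k (PySem.Chars.find cut k)) PySem.Dict.empty).items.map (·.2) = []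
        rw [hit]; rfl
      rw [hv] at hmem
      simp at hmem
    rw [hscan, hmin?, hsz]
    have hne : (((m : Int)) == -1) = false := by
      rw [beq_eq_false_iff_ne]
      omega
    rw [hne]
    simp only [Bool.false_eq_true, if_false, Option.getD_some]
  · -- no operator occurs in cut
    have hfil : ((oprtr_set.map String.toList).filter
        (fun k => decide (PySem.Chars.find cut k > -1))) = [] := by
      rw [List.filter_eq_nil_iff]
      intro k hk
      obtain ⟨op, hop, hopk⟩ := List.mem_map.1 hk
      simp only [decide_eq_true_eq]
      intro hpos
      have hinf : k <:+: cut := (PySem.Chars.find_nonneg_iff cut k).1 (by omega)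
      exact hEx ⟨op, hop, by rw [hopk]; exact hinf⟩
    have hscan : pvScan cut oprtr_set (PySem.List.pyRange 0 ((cut.length : Int) + 1)) = -1 := by
      have hr : ((cut.length : Int) + 1) = ((cut.length + 1 : Nat) : Int) := by push_cast; ring
      rw [hr, PySem.List.pyRange_zero_natCast, List.range_eq_range']
      refine pv_scan_none cut oprtr_set
        (fun i => oprtr_set.any (fun op => PySem.Chars.startswith (List.drop i cut) op.toList))
        (fun i => rfl) (cut.length + 1) 0 ?_
      intro k _ _
      rw [Bool.eq_false_iff]
      intro hany
      rw [List.any_eq_true] at hany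
      obtain ⟨op, hop, hsw⟩ := hany
      have hpre := (PySem.Chars.startswith_iff _ _).1 hsw
      exact hEx ⟨op, hop,
        (List.IsPrefix.isInfix hpre).trans (List.IsSuffix.isInfix (List.drop_suffix k cut))⟩
    rw [hfil, hscan]
    simp [PySem.Dict.empty, PySem.Dict.size]
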